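-- pv_equiv track=rewrite | github.com/haoas/pywysj | c1.py | train_feature_value
-- ===== SOURCE A (Python) =====
-- from collections import defaultdict
-- from operator import itemgetter
--
-- def train_feature_value(x, y_feature, feature_index, value):
--     class_counts = defaultdict(int)
--     for sample, y in zip(x, y_feature):
--         if sample[feature_index] == value:
--             class_counts[y] += 1
--     sorted_class_counts = sorted(class_counts.items(), key=itemgetter(1), reverse=True)
--     most_frequent_class = sorted_class_counts[0][0]
--
--     incorrect_predictions = [class_count for class_value, class_count in class_counts.items() if
--                              class_value != most_frequent_class]
--     error = sum(incorrect_predictions)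
--
--     return most_frequent_class, error
-- ===== SOURCE B (Python) =====
-- def train_feature_value(x, y_feature, feature_index, value):
--     labels = [y for sample, y in zip(x, y_feature) if sample[feature_index] == value]
--     classes = []
--     for c in labels:
--         if c not in classes:
--             classes.append(c)
--     best_class = classes[0]
--     best_count = labels.count(best_class)
--     for c in classes[1:]:
--         n = labels.count(c)
--         if n > best_count:
--             best_class, best_count = c, n
--     return best_class, len(labels) - best_count
-- ===== Notes on version B (the rewrite author's own statement) =====
-- stated objective: alternative
-- what changed: Replaces the dict-counting plus sort-and-slice plus filtered re-sum by a dict-free two-stage pass: collect the matching labels into a list, dedup them into first-occurrence class order, pick the first class with strictly maximal labels.count, and return error = len(labels) - best_count.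
import Mathlib
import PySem

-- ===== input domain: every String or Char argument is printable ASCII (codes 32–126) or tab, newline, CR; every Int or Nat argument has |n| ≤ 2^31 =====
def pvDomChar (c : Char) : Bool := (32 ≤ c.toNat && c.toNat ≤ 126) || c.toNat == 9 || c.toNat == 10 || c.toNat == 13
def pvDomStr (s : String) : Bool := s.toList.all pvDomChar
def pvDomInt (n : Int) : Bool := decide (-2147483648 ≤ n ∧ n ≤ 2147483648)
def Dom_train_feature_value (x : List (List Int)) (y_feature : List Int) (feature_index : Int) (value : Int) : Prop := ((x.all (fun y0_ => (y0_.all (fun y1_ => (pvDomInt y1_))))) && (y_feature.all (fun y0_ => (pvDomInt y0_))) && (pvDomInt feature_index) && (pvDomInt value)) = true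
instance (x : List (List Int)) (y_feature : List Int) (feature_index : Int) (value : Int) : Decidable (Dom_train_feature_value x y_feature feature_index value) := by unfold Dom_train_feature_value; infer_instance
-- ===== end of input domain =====

-- B drops the dict and the sort entirely: it collects the matching labels into a list, builds the
-- distinct classes in first-occurrence order, picks the first class of strictly maximal labels.count
-- and returns error = len(labels) - best_count; same result, different data structures.

-- ===== PORT A =====
def train_feature_value (x : List (List Int)) (y_feature : List Int) (feature_index : Int) (value : Int) : Int × Int :=
  -- class_counts = defaultdict(int); for sample, y in zip(...): if sample[feature_index] == value: class_counts[y] += 1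
  let class_counts : PySem.Dict Int Int :=
    (x.zip y_feature).foldl
      (fun d p => if PySem.List.pyGet? p.1 feature_index = some value then d.modify p.2 0 (· + 1) else d)
      PySem.Dict.empty
  -- sorted(class_counts.items(), key=itemgetter(1), reverse=True)
  let sorted_class_counts := PySem.List.sorted class_counts.items (fun p => p.2) true
  -- sorted_class_counts[0][0]  (IndexError when empty: excluded by Pre_)
  let most_frequent_class := (PySem.List.pyGetD sorted_class_counts 0 (0, 0)).1
  let incorrect_predictions :=
    (class_counts.items.filter (fun p => p.1 ≠ most_frequent_class)).map (fun p => p.2)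
  let error := incorrect_predictions.sum
  (most_frequent_class, error)

-- ===== PORT B =====
def train_feature_value_alt (x : List (List Int)) (y_feature : List Int) (feature_index : Int) (value : Int) : Int × Int :=
  -- labels = [y for sample, y in zip(x, y_feature) if sample[feature_index] == value]
  let labels := ((x.zip y_feature).filter
      (fun p => decide (PySem.List.pyGet? p.1 feature_index = some value))).map (fun p => p.2)
  -- classes = []; for c in labels: if c not in classes: classes.append(c)
  let classes := labels.foldl (fun cs c => if c ∈ cs then cs else cs ++ [c]) ([] : List Int)
  -- best_class = classes[0]  (IndexError when empty: excluded by Pre_)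
  let best_class := PySem.List.pyGetD classes 0 0
  let best_count := (labels.count best_class : Int)
  -- for c in classes[1:]: n = labels.count(c); if n > best_count: ...
  let best := (PySem.List.slice classes (some 1) none).foldl
      (fun (b : Int × Int) c =>
        let n := (labels.count c : Int)
        if n > b.2 then (c, n) else b)
      (best_class, best_count)
  (best.1, (labels.length : Int) - best.2)

-- ===== PRECONDITION & SPEC =====
-- Pre_ excludes exactly the inputs on which A raises IndexError: a zipped sample whose
-- feature_index access is out of range, or no zipped sample matching the value (empty dict, sorted[0]).
def Pre_train_feature_value (x : List (List Int)) (y_feature : List Int) (feature_index : Int) (value : Int) : Prop :=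
  (∀ p ∈ x.zip y_feature, PySem.Raise.InRange p.1.length feature_index) ∧
  (∃ p ∈ x.zip y_feature, PySem.List.pyGet? p.1 feature_index = some value)
instance (x : List (List Int)) (y_feature : List Int) (feature_index : Int) (value : Int) : Decidable (Pre_train_feature_value x y_feature feature_index value) := by unfold Pre_train_feature_value; infer_instance

def pvWitness_train_feature_value : List (List Int) × List Int × Int × Int := ([[1], [1], [2]], [5, 6, 5], 0, 1)

def Spec_train_feature_value (x : List (List Int)) (y_feature : List Int) (feature_index : Int) (value : Int) (out : Int × Int) : Prop := out = train_feature_value_alt x y_feature feature_index value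
instance (x : List (List Int)) (y_feature : List Int) (feature_index : Int) (value : Int) (out : Int × Int) : Decidable (Spec_train_feature_value x y_feature feature_index value out) := by unfold Spec_train_feature_value; infer_instance

-- ===== CLAIM (what is proved, stated in full; the proofs are below) =====
def Claim_equal_train_feature_value : Prop := ∀ (x : List (List Int)) (y_feature : List Int) (feature_index : Int) (value : Int), Dom_train_feature_value x y_feature feature_index value → Pre_train_feature_value x y_feature feature_index value → Spec_train_feature_value x y_feature feature_index value (train_feature_value x y_feature feature_index value)

-- ===== LEMMAS AND PROOFS =====

-- B's max scan returns an element of the list it scans (plus the start)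
lemma pvScan_mem (l : List (Int × Int)) (a : Int × Int) :
    l.foldl (fun b p => if p.2 > b.2 then p else b) a ∈ a :: l := by
  induction l generalizing a with
  | nil => simp
  | cons p t ih =>
      simp only [List.foldl_cons]
      rcases List.mem_cons.mp (ih (if p.2 > a.2 then p else a)) with h | h
      · rw [h]; split
        · exact List.mem_cons_of_mem _ (List.mem_cons_self)
        · exact List.mem_cons_self
      · exact List.mem_cons_of_mem _ (List.mem_cons_of_mem _ h)

-- head of the stable reverse sort by snd = the strict-greater scan
lemma pvSorted_head (l : List (Int × Int)) (a : Int × Int) :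
    (PySem.List.sorted (a :: l) (fun p => p.2) true).head? =
      some (l.foldl (fun b p => if p.2 > b.2 then p else b) a) := by
  induction l using List.reverseRecOn with
  | nil =>
      rw [PySem.List.sorted_rev_eq_foldl_insertBy]
      simp [PySem.List.insertBy]
  | append_singleton t p ih =>
      rw [PySem.List.sorted_rev_eq_foldl_insertBy] at *
      have : a :: (t ++ [p]) = (a :: t) ++ [p] := by simp
      rw [this, List.foldl_append, List.foldl_append]
      set s := List.foldl (fun acc x => PySem.List.insertBy (fun a b => decide (b.2 < a.2)) x acc) [] (a :: t) with hs
      have hsne : s ≠ [] := by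
        rw [hs, ← PySem.List.sorted_rev_eq_foldl_insertBy]
        simp [PySem.List.sorted_eq_nil_iff]
      obtain ⟨h, tl, hst⟩ := List.exists_cons_of_ne_nil hsne
      have hh : h = List.foldl (fun b p => if p.2 > b.2 then p else b) a t := by
        have := ih
        rw [hst] at this
        simpa using this
      simp only [List.foldl_cons, List.foldl_nil, hst, PySem.List.insertBy]
      rw [hh]
      by_cases hlt : (List.foldl (fun b p => if p.2 > b.2 then p else b) a t).2 < p.2
      · simp [hlt]
      · simp [hlt, gt_iff_lt]

-- A's error: removing the (unique-keyed) best element and summing = total - best count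
lemma pvSum_filter (l : List (Int × Int)) (b : Int × Int)
    (hnd : (l.map Prod.fst).Nodup) (hb : b ∈ l) :
    ((l.filter (fun p => p.1 ≠ b.1)).map (fun p => p.2)).sum =
      (l.map (fun p => p.2)).sum - b.2 := by
  induction l with
  | nil => simp at hb
  | cons q t ih =>
      simp only [List.map_cons, List.nodup_cons] at hnd
      by_cases hq : q.1 = b.1
      · have hbq : b = q := by
          rcases List.mem_cons.mp hb with rfl | hbt
          · rfl
          · have h1 : q.1 ∈ t.map Prod.fst := by
              rw [hq]; exact List.mem_map.mpr ⟨b, hbt, rfl⟩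
            exact absurd h1 hnd.1
        subst hbq
        have hkeep : t.filter (fun p => decide (p.1 ≠ b.1)) = t := by
          apply List.filter_eq_self.mpr
          intro p hp
          simp only [decide_eq_true_eq]
          intro hpe
          exact hnd.1 (List.mem_map.mpr ⟨p, hp, hpe.trans hq.symm⟩)
        rw [List.filter_cons_of_neg (by simp), hkeep]
        simp only [List.map_cons, List.sum_cons]
        ring
      · have hbt : b ∈ t := by
          rcases List.mem_cons.mp hb with rfl | hbt
          · exact absurd rfl hq
          · exact hbt
        rw [List.filter_cons_of_pos (by simp [hq])]
        simp only [List.map_cons, List.sum_cons, ih hnd.2 hbt]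
        ring

-- A's guarded counting loop over the zip IS Counter(labels)
lemma pvDict_eq_counter (x : List (List Int)) (y_feature : List Int) (feature_index value : Int) :
    (x.zip y_feature).foldl
      (fun d p => if PySem.List.pyGet? p.1 feature_index = some value then d.modify p.2 0 (· + 1) else d)
      PySem.Dict.empty
    = PySem.Dict.counter (((x.zip y_feature).filter
        (fun p => decide (PySem.List.pyGet? p.1 feature_index = some value))).map (fun p => p.2)) := by
  rw [PySem.Dict.counter_eq_foldl, List.foldl_map, List.foldl_filter]
  simp only [decide_eq_true_eq]

-- B's dedup loop IS PySem.Set.ofList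
lemma pvClasses_eq_ofList (labels : List Int) :
    labels.foldl (fun cs c => if c ∈ cs then cs else cs ++ [c]) ([] : List Int)
      = PySem.Set.ofList labels := by
  rw [PySem.Set.ofList_eq_foldl]
  congr 1
  funext cs c
  rw [PySem.Set.add_eq_ite]

-- sum of counts over the distinct elements = length
lemma pvSum_counts (labels : List Int) :
    ((PySem.Set.ofList labels).map (fun k => (labels.count k : Int))).sum
      = (labels.length : Int) := by
  have hperm : (PySem.Set.ofList labels).Perm labels.dedup := by
    apply (List.perm_ext_iff_of_nodup (PySem.Set.nodup_ofList labels) labels.nodup_dedup).mpr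
    intro a
    rw [PySem.Set.mem_ofList labels a, List.mem_dedup]
  have := (hperm.map (fun k => (labels.count k : Int))).sum_eq
  rw [this]
  have hnat : (labels.dedup.map (fun k => labels.count k)).sum = labels.length :=
    labels.sum_map_count_dedup_eq_length
  have : (labels.dedup.map (fun k => (labels.count k : Int))).sum
      = ((labels.dedup.map (fun k => labels.count k)).sum : Int) := by
    induction labels.dedup with
    | nil => simp
    | cons a t ih => simp [ih]
  rw [this, hnat]

-- ===== VERDICT (by name: the statement is the Claim_ definition above) =====
theorem train_feature_value_spec : Claim_equal_train_feature_value := by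
  intro x y_feature feature_index value _hdom hpre
  unfold Spec_train_feature_value train_feature_value train_feature_value_alt
  set labels := ((x.zip y_feature).filter
      (fun p => decide (PySem.List.pyGet? p.1 feature_index = some value))).map (fun p => p.2) with hlabels
  rw [pvDict_eq_counter]
  dsimp only
  rw [pvClasses_eq_ofList, PySem.List.slice_from_one]
  set S := PySem.Set.ofList labels with hS
  have hitems : (PySem.Dict.counter labels).items
      = S.map (fun k => (k, (labels.count k : Int))) := PySem.Dict.items_counter labels
  -- labels is nonempty, hence S is a cons
  have hlne : labels ≠ [] := by
    rcases hpre.2 with ⟨p, hp, hv⟩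
    have : p.2 ∈ labels := by
      rw [hlabels]
      exact List.mem_map.mpr ⟨p, List.mem_filter.mpr ⟨hp, by simp [hv]⟩, rfl⟩
    intro h; rw [h] at this; simp at this
  have hSne : S ≠ [] := by
    intro h
    rcases List.exists_mem_of_ne_nil labels hlne with ⟨c, hc⟩
    have : c ∈ S := (PySem.Set.mem_ofList labels c).mpr hc
    rw [h] at this; simp at this
  obtain ⟨k0, ks, hcons⟩ := List.exists_cons_of_ne_nil hSne
  rw [hitems, hcons]
  simp only [List.map_cons, List.tail_cons, PySem.List.pyGetD_zero_cons]
  -- A's sorted head = the max scan over the items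
  have hhead : (PySem.List.pyGetD
      (PySem.List.sorted ((k0, (labels.count k0 : Int)) ::
        ks.map (fun k => (k, (labels.count k : Int)))) (fun p => p.2) true) 0 (0, 0))
      = (ks.map (fun k => (k, (labels.count k : Int)))).foldl
          (fun b p => if p.2 > b.2 then p else b) (k0, (labels.count k0 : Int)) := by
    obtain ⟨h, tl, hst⟩ := List.exists_cons_of_ne_nil
      (by simp [PySem.List.sorted_eq_nil_iff] :
        PySem.List.sorted ((k0, (labels.count k0 : Int)) ::
          ks.map (fun k => (k, (labels.count k : Int)))) (fun p => p.2) true ≠ [])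
    have hh := pvSorted_head (ks.map (fun k => (k, (labels.count k : Int)))) (k0, (labels.count k0 : Int))
    rw [hst] at hh ⊢
    simp only [List.head?_cons, Option.some.injEq] at hh
    rw [PySem.List.pyGetD_zero_cons, hh]
  -- the two scans compute the same best pair
  have hscan : (ks.map (fun k => (k, (labels.count k : Int)))).foldl
      (fun b p => if p.2 > b.2 then p else b) (k0, (labels.count k0 : Int))
      = ks.foldl (fun (b : Int × Int) c =>
          let n := (labels.count c : Int); if n > b.2 then (c, n) else b)
        (k0, (labels.count k0 : Int)) := by
    rw [List.foldl_map]
  set best := ks.foldl (fun (b : Int × Int) c =>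
      let n := (labels.count c : Int); if n > b.2 then (c, n) else b)
    (k0, (labels.count k0 : Int)) with hbest
  simp only [hhead, hscan]
  -- the best pair is one of the items, whose keys are distinct
  have hbmem : best ∈ (k0, (labels.count k0 : Int)) :: ks.map (fun k => (k, (labels.count k : Int))) := by
    rw [← hscan]
    exact pvScan_mem _ _
  have hnd : (((k0, (labels.count k0 : Int)) ::
      ks.map (fun k => (k, (labels.count k : Int)))).map Prod.fst).Nodup := by
    have h1 : ((k0, (labels.count k0 : Int)) ::
        ks.map (fun k => (k, (labels.count k : Int)))).map Prod.fst = k0 :: ks := by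
      simp [List.map_map, Function.comp_def]
    rw [h1, ← hcons]
    exact PySem.Set.nodup_ofList labels
  have hsum := pvSum_filter _ best hnd hbmem
  rw [hsum]
  -- total of the counts = number of labels
  have htot : (((k0, (labels.count k0 : Int)) ::
      ks.map (fun k => (k, (labels.count k : Int)))).map (fun p => p.2)).sum
      = (labels.length : Int) := by
    have h2 : ((k0, (labels.count k0 : Int)) ::
        ks.map (fun k => (k, (labels.count k : Int)))).map (fun p => p.2)
        = (k0 :: ks).map (fun k => (labels.count k : Int)) := by
      simp [List.map_map, Function.comp_def]
    rw [h2, ← hcons]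
    exact pvSum_counts labels
  rw [htot]
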